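-- pv_equiv track=rewrite | github.com/karindoy/python-exercices | soma_lista_recursivo.py | soma_lista
-- ===== SOURCE A (Python) =====
-- def soma_lista(lista):
--
--     if(len(lista) == 1):
--         return lista[0]
--
--     ultimo_idx = len(lista) - 1
--     ultimo_valor = lista[ultimo_idx]
--     lista.pop()
--     lista[0] += ultimo_valor
--
--     return soma_lista(lista)
-- ===== SOURCE B (Python) =====
-- def soma_lista(lista):
--     # Front-to-back accumulation; returns the same sum. Unlike A, it does
--     # not mutate the argument (A shrinks lista in place down to a single element holding the total).
--     total = lista[0]
--     for x in lista[1:]: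
--         total += x
--     return total
-- ===== Notes on version B (the rewrite author's own statement) =====
-- stated objective: simpler
-- what changed: Replaces A's tail recursion that pops the last element and folds it into the first element (quadratic list mutation) by a single front-to-back accumulation loop; the argument is no longer mutated (return value only).
import Mathlib
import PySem

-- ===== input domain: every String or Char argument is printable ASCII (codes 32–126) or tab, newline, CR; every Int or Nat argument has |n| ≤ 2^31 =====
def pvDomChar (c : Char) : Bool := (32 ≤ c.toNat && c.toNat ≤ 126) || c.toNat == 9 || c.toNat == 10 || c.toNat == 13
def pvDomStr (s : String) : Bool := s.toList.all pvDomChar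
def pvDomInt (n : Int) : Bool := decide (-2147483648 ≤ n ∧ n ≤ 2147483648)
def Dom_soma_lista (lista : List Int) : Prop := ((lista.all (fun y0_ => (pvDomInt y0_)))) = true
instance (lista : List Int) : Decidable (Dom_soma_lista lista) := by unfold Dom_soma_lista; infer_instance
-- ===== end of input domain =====

-- B replaces A's pop-last-into-head tail recursion by a single front-to-back
-- accumulation loop (simpler); A mutates its argument in place, B does not —
-- the equivalence proved here is about the return value only.


-- ===== PORT A =====
-- A: if the length is 1 return the head; else take the last value, pop it,
-- add it into the first element, recurse. The [] branch corresponds to A raising IndexError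
-- (excluded by Pre_); the value 0 there is never claimed.
def soma_lista (lista : List Int) : Int :=
  if lista.length = 1 then lista.headD 0
  else
    match lista with
    | [] => 0
    | a :: t =>
      let ultimo_valor := (a :: t).getLastD 0
      match h : (a :: t).dropLast with
      | [] => 0
      | b :: u => soma_lista ((b + ultimo_valor) :: u)
termination_by lista.length
decreasing_by
  have hl : ((a :: t).dropLast).length = t.length := by
    simp
  rw [h] at hl
  simp_all

-- ===== PORT B =====
-- B: total = lista[0]; for x in lista[1:]: total += x; return total
def soma_lista_alt (lista : List Int) : Int :=
  match lista with
  | [] => 0   -- B raises IndexError here (excluded by Pre_)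
  | total :: rest => rest.foldl (fun acc x => acc + x) total

-- ===== PRECONDITION & SPEC =====
-- A (and B) raise IndexError on the empty list; Pre_ excludes exactly it.
def Pre_soma_lista (lista : List Int) : Prop := lista ≠ []
instance (lista : List Int) : Decidable (Pre_soma_lista lista) := by unfold Pre_soma_lista; infer_instance
def pvWitness_soma_lista : List Int := ([1, 2, 3])
def Spec_soma_lista (lista : List Int) (out : Int) : Prop := out = soma_lista_alt lista
instance (lista : List Int) (out : Int) : Decidable (Spec_soma_lista lista out) := by unfold Spec_soma_lista; infer_instance

-- ===== CLAIM (what is proved, stated in full; the proofs are below) =====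
def Claim_equal_soma_lista : Prop := ∀ (lista : List Int), Dom_soma_lista lista → Pre_soma_lista lista → Spec_soma_lista lista (soma_lista lista)

-- ===== LEMMAS AND PROOFS =====

theorem soma_alt_eq_sum (lista : List Int) (h : lista ≠ []) :
    soma_lista_alt lista = lista.sum := by
  match lista with
  | [] => exact absurd rfl h
  | a :: t =>
    induction t generalizing a with
    | nil => simp [soma_lista_alt]
    | cons x xs ih => simp [soma_lista_alt, List.foldl] at ih ⊢; rw [ih]; ring

theorem soma_eq_sum (lista : List Int) (h : lista ≠ []) :
    soma_lista lista = lista.sum := by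
  induction hn : lista.length using Nat.strong_induction_on generalizing lista with
  | _ n ih =>
    match lista with
    | [] => exact absurd rfl h
    | a :: t =>
      rw [soma_lista.eq_def]
      by_cases h1 : (a :: t).length = 1
      · have : t = [] := by
          simp at h1; exact h1
        subst this
        simp
      · simp only [h1, if_false]
        match hd : (a :: t).dropLast with
        | [] =>
          exfalso
          have := congrArg List.length hd
          simp at this
          subst this
          simp at h1
        | b :: u =>
          have hg : (a :: t).getLast (by simp) = (a :: t).getLastD 0 := by
            simp [List.getLastD_eq_getLast?, List.getLast?_eq_getLast]
          have hlen : ((b + (a :: t).getLastD 0) :: u).length < n := by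
            have := congrArg List.length hd
            simp at this
            simp [← hn, this]
          show soma_lista ((b + (a :: t).getLastD 0) :: u) = (a :: t).sum
          rw [ih _ (by omega) _ (by simp) rfl]
          have hsplit : (a :: t) = (b :: u) ++ [(a :: t).getLastD 0] := by
            rw [← hd, ← hg]; exact (List.dropLast_append_getLast (by simp)).symm
          have hsum : (a :: t).sum = (b :: u).sum + (a :: t).getLastD 0 := by
            conv_lhs => rw [hsplit]
            simp [List.sum_append]
            ring
          rw [hsum]
          simp
          ring

-- ===== VERDICT (by name: the statement is the Claim_ definition above) =====
theorem soma_lista_spec : Claim_equal_soma_lista := by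
  intro lista _ hpre
  unfold Spec_soma_lista
  rw [soma_eq_sum lista hpre, soma_alt_eq_sum lista hpre]
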